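-- pv_equiv track=rewrite | github.com/orlandomgr/practice | hackerrank/py/Count Number Pairs.py | countAffordablePairs
-- ===== SOURCE A (Python) =====
-- def countAffordablePairs(prices, budget):
--     # Write your code here
--     if len(prices) < 2:
--         return 0
--
--     prices.sort()
--     count = 0
--     for i in range(len(prices) - 1):
--         for j in range(i + 1, len(prices)):
--             if prices[i] + prices[j] <= budget:
--                 count += 1
--
--     return count
-- ===== SOURCE B (Python) =====
-- def countAffordablePairs(prices, budget):
--     # Sort once, then count with two pointers: whenever the outermost pair fits,
--     # every pair (lo, j) for lo < j <= hi fits too, so add hi - lo at once.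
--     s = sorted(prices)
--     lo, hi = 0, len(s) - 1
--     count = 0
--     while lo < hi:
--         if s[lo] + s[hi] <= budget:
--             count += hi - lo
--             lo += 1
--         else:
--             hi -= 1
--     return count
-- ===== Notes on version B (the rewrite author's own statement) =====
-- stated objective: faster
-- what changed: A's nested loop over all index pairs of the sorted list is replaced by a two-pointer sweep that, whenever the extreme pair fits the budget, counts all hi-lo pairs with the low element at once; B also does not mutate the input list (A sorts it in place).
import Mathlib
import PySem

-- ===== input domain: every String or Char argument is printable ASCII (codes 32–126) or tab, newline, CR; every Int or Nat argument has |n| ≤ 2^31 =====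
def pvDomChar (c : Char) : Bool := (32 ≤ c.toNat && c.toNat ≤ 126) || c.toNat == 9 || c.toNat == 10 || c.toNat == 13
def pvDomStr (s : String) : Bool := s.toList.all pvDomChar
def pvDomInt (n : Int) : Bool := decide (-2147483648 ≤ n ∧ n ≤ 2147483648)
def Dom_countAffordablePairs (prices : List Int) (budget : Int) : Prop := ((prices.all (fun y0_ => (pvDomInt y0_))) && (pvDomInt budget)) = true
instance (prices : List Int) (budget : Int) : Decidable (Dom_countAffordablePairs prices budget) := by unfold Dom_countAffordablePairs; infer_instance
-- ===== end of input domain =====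

-- B replaces A's quadratic scan over all index pairs by sort + two-pointer counting (alternative algorithm).
-- Note: Python A sorts `prices` in place (a caller-visible mutation); B does not — the equivalence proved here is about the return value.

-- ===== PORT A =====
def countAffordablePairs (prices : List Int) (budget : Int) : Int :=
  if (prices.length : Int) < 2 then 0
  else
    let s := PySem.List.sorted prices (fun x => x) false
    let n : Int := (s.length : Int)
    (PySem.List.pyRange 0 (n - 1)).foldl (fun count i =>
      (PySem.List.pyRange (i + 1) n).foldl (fun count j =>
        if PySem.List.pyGetD s i 0 + PySem.List.pyGetD s j 0 ≤ budget then count + 1 else count)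
        count) 0

-- ===== PORT B =====
-- the `while lo < hi` loop of Source B
def twoPtrLoop (s : List Int) (budget lo hi count : Int) : Int :=
  if lo < hi then
    if PySem.List.pyGetD s lo 0 + PySem.List.pyGetD s hi 0 ≤ budget then
      twoPtrLoop s budget (lo + 1) hi (count + (hi - lo))
    else
      twoPtrLoop s budget lo (hi - 1) count
  else count
termination_by (hi - lo).toNat
decreasing_by all_goals omega

def countAffordablePairs_alt (prices : List Int) (budget : Int) : Int :=
  let s := PySem.List.sorted prices (fun x => x) false
  twoPtrLoop s budget 0 ((s.length : Int) - 1) 0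

-- ===== PRECONDITION & SPEC =====
def Spec_countAffordablePairs (prices : List Int) (budget : Int) (out : Int) : Prop := out = countAffordablePairs_alt prices budget
instance (prices : List Int) (budget : Int) (out : Int) : Decidable (Spec_countAffordablePairs prices budget out) := by unfold Spec_countAffordablePairs; infer_instance

-- ===== CLAIM (what is proved, stated in full; the proofs are below) =====
def Claim_equal_countAffordablePairs : Prop := ∀ (prices : List Int) (budget : Int), Dom_countAffordablePairs prices budget → Spec_countAffordablePairs prices budget (countAffordablePairs prices budget)

-- ===== LEMMAS AND PROOFS =====

-- number of j in (i, hi] with s[i] + s[j] ≤ b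
def rowCnt (s : List Int) (b i hi : Int) : Int :=
  ((PySem.List.pyRange (i + 1) (hi + 1)).countP
    (fun j => decide (PySem.List.pyGetD s i 0 + PySem.List.pyGetD s j 0 ≤ b)) : Nat)

-- number of pairs lo ≤ i < j ≤ hi with s[i] + s[j] ≤ b
def winCnt (s : List Int) (b lo hi : Int) : Int :=
  (((PySem.List.pyRange lo hi).map (fun i => rowCnt s b i hi)).sum)

lemma winCnt_zero (s : List Int) (b lo hi : Int) (h : hi ≤ lo) : winCnt s b lo hi = 0 := by
  simp [winCnt, PySem.List.pyRange_one_eq_nil h]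

-- monotonicity of the sorted list under pyGetD
lemma sorted_getD_mono (prices : List Int) (p q : Int) (hp : 0 ≤ p) (hpq : p ≤ q)
    (hq : q < ((PySem.List.sorted prices (fun x => x) false).length : Int)) :
    PySem.List.pyGetD (PySem.List.sorted prices (fun x => x) false) p 0 ≤
      PySem.List.pyGetD (PySem.List.sorted prices (fun x => x) false) q 0 := by
  rw [PySem.List.pyGetD_eq_getElem _ _ hp (by omega),
      PySem.List.pyGetD_eq_getElem _ _ (by omega) hq]
  exact PySem.List.key_sorted_getElem_mono prices (fun x => x) (by omega) (by omega)

lemma rowCnt_full (prices : List Int) (b lo hi : Int) (hlo : 0 ≤ lo) (hlt : lo < hi)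
    (hhi : hi < ((PySem.List.sorted prices (fun x => x) false).length : Int))
    (hfit : PySem.List.pyGetD (PySem.List.sorted prices (fun x => x) false) lo 0 +
            PySem.List.pyGetD (PySem.List.sorted prices (fun x => x) false) hi 0 ≤ b) :
    rowCnt (PySem.List.sorted prices (fun x => x) false) b lo hi = hi - lo := by
  unfold rowCnt
  rw [List.countP_eq_length.2 ?_]
  · rw [PySem.List.length_pyRange_one]; omega
  · intro j hj
    rw [PySem.List.mem_pyRange_one] at hj
    simp only [decide_eq_true_eq]
    have := sorted_getD_mono prices j hi (by omega) (by omega) hhi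
    omega

lemma rowCnt_drop (prices : List Int) (b lo i hi : Int) (hlo : 0 ≤ lo) (hli : lo ≤ i)
    (hih : i < hi) (hhi : hi < ((PySem.List.sorted prices (fun x => x) false).length : Int))
    (hnofit : b < PySem.List.pyGetD (PySem.List.sorted prices (fun x => x) false) lo 0 +
              PySem.List.pyGetD (PySem.List.sorted prices (fun x => x) false) hi 0) :
    rowCnt (PySem.List.sorted prices (fun x => x) false) b i hi =
      rowCnt (PySem.List.sorted prices (fun x => x) false) b i (hi - 1) := by
  unfold rowCnt
  rw [PySem.List.pyRange_one_succ_right (by omega : i + 1 ≤ hi), List.countP_append]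
  have h1 : (hi - 1) + 1 = hi := by ring
  rw [h1]
  have hmono := sorted_getD_mono prices lo i hlo hli (by omega)
  simp only [List.countP_cons, List.countP_nil, decide_eq_true_eq]
  have : ¬ (PySem.List.pyGetD (PySem.List.sorted prices (fun x => x) false) i 0 +
            PySem.List.pyGetD (PySem.List.sorted prices (fun x => x) false) hi 0 ≤ b) := by omega
  simp [this]

lemma winCnt_shrink (prices : List Int) (b lo hi : Int) (hlo : 0 ≤ lo) (hlt : lo < hi)
    (hhi : hi < ((PySem.List.sorted prices (fun x => x) false).length : Int))
    (hnofit : b < PySem.List.pyGetD (PySem.List.sorted prices (fun x => x) false) lo 0 +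
              PySem.List.pyGetD (PySem.List.sorted prices (fun x => x) false) hi 0) :
    winCnt (PySem.List.sorted prices (fun x => x) false) b lo hi =
      winCnt (PySem.List.sorted prices (fun x => x) false) b lo (hi - 1) := by
  unfold winCnt
  have h2 : hi - 1 + 1 = hi := by ring
  have hsplit : PySem.List.pyRange lo hi = PySem.List.pyRange lo (hi - 1) ++ [hi - 1] := by
    have h3 := PySem.List.pyRange_one_succ_right (a := lo) (b := hi - 1) (by omega)
    rwa [h2] at h3
  rw [hsplit, List.map_append, List.sum_append]
  simp only [List.map_cons, List.map_nil, List.sum_cons, List.sum_nil]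
  have hlast : rowCnt (PySem.List.sorted prices (fun x => x) false) b (hi - 1) hi = 0 := by
    unfold rowCnt
    have hmono := sorted_getD_mono prices lo (hi - 1) hlo (by omega) (by omega)
    rw [show (hi - 1) + 1 = hi from by ring, PySem.List.pyRange_one_succ_right (le_refl hi),
        PySem.List.pyRange_one_eq_nil (le_refl hi)]
    simp only [List.nil_append, List.countP_cons, List.countP_nil, decide_eq_true_eq]
    have : ¬ (PySem.List.pyGetD (PySem.List.sorted prices (fun x => x) false) (hi - 1) 0 +
              PySem.List.pyGetD (PySem.List.sorted prices (fun x => x) false) hi 0 ≤ b) := by omega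
    simp [this]
  rw [hlast]
  have hrows : ((PySem.List.pyRange lo (hi - 1)).map
      (fun i => rowCnt (PySem.List.sorted prices (fun x => x) false) b i hi)) =
      ((PySem.List.pyRange lo (hi - 1)).map
      (fun i => rowCnt (PySem.List.sorted prices (fun x => x) false) b i (hi - 1))) := by
    apply List.map_congr_left
    intro i hi_mem
    rw [PySem.List.mem_pyRange_one] at hi_mem
    exact rowCnt_drop prices b lo i hi hlo hi_mem.1 (by omega) hhi hnofit
  rw [hrows]
  simp

lemma loop_eq (prices : List Int) (b : Int) :
    ∀ (n : Nat) (lo hi count : Int), (hi - lo).toNat = n → 0 ≤ lo →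
    hi < ((PySem.List.sorted prices (fun x => x) false).length : Int) →
    twoPtrLoop (PySem.List.sorted prices (fun x => x) false) b lo hi count =
      count + winCnt (PySem.List.sorted prices (fun x => x) false) b lo hi := by
  intro n
  induction n using Nat.strong_induction_on with
  | _ n ih =>
    intro lo hi count hn hlo hhi
    rw [twoPtrLoop]
    by_cases hlt : lo < hi
    · rw [if_pos hlt]
      by_cases hfit : PySem.List.pyGetD (PySem.List.sorted prices (fun x => x) false) lo 0 +
          PySem.List.pyGetD (PySem.List.sorted prices (fun x => x) false) hi 0 ≤ b
      · rw [if_pos hfit]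
        rw [ih (hi - (lo + 1)).toNat (by omega) (lo + 1) hi _ rfl (by omega) hhi]
        unfold winCnt
        rw [PySem.List.pyRange_one_cons hlt, List.map_cons, List.sum_cons,
            rowCnt_full prices b lo hi hlo hlt hhi hfit]
        ring
      · rw [if_neg hfit]
        rw [ih (hi - 1 - lo).toNat (by omega) lo (hi - 1) _ rfl hlo (by omega)]
        rw [winCnt_shrink prices b lo hi hlo hlt hhi (by omega)]
    · rw [if_neg hlt, winCnt_zero _ _ _ _ (by omega)]
      ring

lemma A_eq_winCnt (prices : List Int) (b : Int) :
    countAffordablePairs prices b =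
      winCnt (PySem.List.sorted prices (fun x => x) false) b 0
        (((PySem.List.sorted prices (fun x => x) false).length : Int) - 1) := by
  unfold countAffordablePairs
  by_cases hsmall : (prices.length : Int) < 2
  · rw [if_pos hsmall, winCnt_zero]
    rw [PySem.List.length_sorted]; omega
  · rw [if_neg hsmall]
    simp only []
    set s := PySem.List.sorted prices (fun x => x) false with hs
    set n : Int := (s.length : Int) with hn
    rw [PySem.List.foldl_congr_mem (PySem.List.pyRange 0 (n - 1)) _
      (fun count i => count + rowCnt s b i (n - 1)) 0 ?_]
    · rw [PySem.List.foldl_add]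
      simp [winCnt]
    · intro acc i hi_mem
      have hfun : (fun (count : Int) j =>
          if PySem.List.pyGetD s i 0 + PySem.List.pyGetD s j 0 ≤ b then count + 1 else count) =
          (fun (count : Int) j =>
          if (fun j => decide (PySem.List.pyGetD s i 0 + PySem.List.pyGetD s j 0 ≤ b)) j = true
          then count + 1 else count) := by
        funext c j; simp
      rw [hfun, PySem.List.foldl_count_if]
      unfold rowCnt
      have h1 : (n - 1) + 1 = n := by ring
      rw [h1]

-- ===== VERDICT (by name: the statement is the Claim_ definition above) =====
theorem countAffordablePairs_spec : Claim_equal_countAffordablePairs := by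
  intro prices budget _
  unfold Spec_countAffordablePairs countAffordablePairs_alt
  rw [A_eq_winCnt prices budget,
      loop_eq prices budget _ 0 (((PySem.List.sorted prices (fun x => x) false).length : Int) - 1) 0
        rfl (by omega) (by omega)]
  ring
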